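-- pv_equiv track=rewrite | github.com/Abercus/devmining_utilities | utils.py | check_trace_event_attributes
-- ===== SOURCE A (Python) =====
-- def check_trace_event_attributes(trace, attribute_value_dict: dict):
--     """
--     Collect all event attributes which have key in attribute_value_dict
--     Keep first one if it is a repetition.
--     Check if match attribute value dict
--     """
--     event_attributes = {}
--     for event in trace:
--         for k in attribute_value_dict.keys():
--             if k in event and k not in event_attributes:
--                 event_attributes[k] = str(event[k])
--
--     #  All attributes collected, now check if conditions match
--
--     matched_count = 0
--     for k, v in attribute_value_dict.items():
--         if k in event_attributes and event_attributes[k] == v: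
--             matched_count += 1
--         else:
--             return 0  # at least one doesnt match
--
--     if matched_count == len(attribute_value_dict):
--         # all matches
--         return 2
--
--     return 0
-- ===== SOURCE B (Python) =====
-- def check_trace_event_attributes(trace, attribute_value_dict: dict):
--     """Per-key first-match search with early exit; no intermediate attribute table."""
--     events = list(trace)
--     for k, v in attribute_value_dict.items():
--         found = next((str(event[k]) for event in events if k in event), None)
--         if found is None or found != v:
--             return 0
--     return 2
-- ===== Notes on version B (the rewrite author's own statement) =====
-- stated objective: simpler
-- what changed: B removes A's intermediate first-occurrence attribute table and its two-phase collect-then-validate structure: it loops once over the dict items and for each key searches the trace for the first event containing it, returning 0 on the first mismatch.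
import Mathlib
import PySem

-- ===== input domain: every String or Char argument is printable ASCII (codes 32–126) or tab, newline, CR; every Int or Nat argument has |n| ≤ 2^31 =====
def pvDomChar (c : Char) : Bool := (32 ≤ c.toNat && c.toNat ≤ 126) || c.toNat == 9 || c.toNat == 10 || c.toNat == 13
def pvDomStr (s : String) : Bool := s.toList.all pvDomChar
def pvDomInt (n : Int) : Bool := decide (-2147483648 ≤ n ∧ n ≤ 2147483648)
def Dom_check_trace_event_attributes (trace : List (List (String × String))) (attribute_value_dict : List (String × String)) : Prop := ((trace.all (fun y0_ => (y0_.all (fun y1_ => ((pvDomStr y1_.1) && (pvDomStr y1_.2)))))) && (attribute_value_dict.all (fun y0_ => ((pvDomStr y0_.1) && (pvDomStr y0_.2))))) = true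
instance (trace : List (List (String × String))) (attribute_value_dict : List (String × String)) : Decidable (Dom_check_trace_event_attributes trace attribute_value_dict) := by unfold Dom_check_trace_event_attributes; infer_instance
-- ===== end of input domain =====

-- B drops A's intermediate first-occurrence attribute table and instead searches the trace
-- per dict key with an early exit (objective: simpler decomposition, same worst-case cost).


-- ===== PORT A =====
-- body of A's inner 'if k in event and k not in event_attributes: event_attributes[k] = str(event[k])'
-- (values are strings, so str(event[k]) is event[k] itself)
def pvStep (event ea : PySem.Dict String String) (k : String) : PySem.Dict String String :=
  match event.get? k, ea.get? k with
  | some v, none => ea.insert k v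
  | _, _ => ea

-- A's second loop: 'for k, v in attribute_value_dict.items(): …' with matched_count and early return 0
def pvACheck (ea : PySem.Dict String String) (n : Int) : List (String × String) → Int → Int
  | [], mc => if mc = n then 2 else 0
  | (k, v) :: rest, mc => if ea.get? k = some v then pvACheck ea n rest (mc + 1) else 0

def check_trace_event_attributes (trace : List (List (String × String))) (attribute_value_dict : List (String × String)) : Int :=
  let events := trace.map PySem.Dict.ofList
  let d := PySem.Dict.ofList attribute_value_dict
  let ea := events.foldl (fun ea event => d.keys.foldl (fun ea k => pvStep event ea k) ea) PySem.Dict.empty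
  pvACheck ea (d.size : Int) d.items 0

-- ===== PORT B =====
-- 'next((str(event[k]) for event in events if k in event), None)'
def pvFind (events : List (PySem.Dict String String)) (k : String) : Option String :=
  match events with
  | [] => none
  | e :: es =>
    match e.get? k with
    | some v => some v
    | none => pvFind es k

-- B's single loop over items with early return 0
def pvBGo (events : List (PySem.Dict String String)) : List (String × String) → Int
  | [] => 2
  | (k, v) :: rest =>
    match pvFind events k with
    | none => 0
    | some found => if found = v then pvBGo events rest else 0

def check_trace_event_attributes_alt (trace : List (List (String × String))) (attribute_value_dict : List (String × String)) : Int :=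
  let events := trace.map PySem.Dict.ofList
  pvBGo events (PySem.Dict.ofList attribute_value_dict).items

-- ===== PRECONDITION & SPEC =====
def Spec_check_trace_event_attributes (trace : List (List (String × String))) (attribute_value_dict : List (String × String)) (out : Int) : Prop := out = check_trace_event_attributes_alt trace attribute_value_dict
instance (trace : List (List (String × String))) (attribute_value_dict : List (String × String)) (out : Int) : Decidable (Spec_check_trace_event_attributes trace attribute_value_dict out) := by unfold Spec_check_trace_event_attributes; infer_instance

-- ===== CLAIM (what is proved, stated in full; the proofs are below) =====
def Claim_equal_check_trace_event_attributes : Prop := ∀ (trace : List (List (String × String))) (attribute_value_dict : List (String × String)), Dom_check_trace_event_attributes trace attribute_value_dict → Spec_check_trace_event_attributes trace attribute_value_dict (check_trace_event_attributes trace attribute_value_dict)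

-- ===== LEMMAS AND PROOFS =====

theorem pvFind_cons (e : PySem.Dict String String) (es : List (PySem.Dict String String)) (k : String) :
    pvFind (e :: es) k = (e.get? k).or (pvFind es k) := by
  cases h : e.get? k <;> simp [pvFind, h]

theorem pvStep_get? (event ea : PySem.Dict String String) (k' k : String) :
    (pvStep event ea k').get? k = if k = k' then (ea.get? k).or (event.get? k) else ea.get? k := by
  by_cases hk : k = k'
  · subst hk
    rcases hv : event.get? k with _ | v <;> rcases he : ea.get? k with _ | w <;>
      simp [pvStep, hv, he, PySem.Dict.get?_insert_self]
  · rcases hv : event.get? k' with _ | v <;> rcases he : ea.get? k' with _ | w <;>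
      simp [pvStep, hv, he, hk, PySem.Dict.get?_insert_of_ne]

theorem foldl_step_get? (event : PySem.Dict String String) (ks : List String) :
    ∀ (ea : PySem.Dict String String) (k : String),
      (ks.foldl (fun ea k => pvStep event ea k) ea).get? k
        = if k ∈ ks then (ea.get? k).or (event.get? k) else ea.get? k := by
  induction ks with
  | nil => intro ea k; simp
  | cons k' ks ih =>
    intro ea k
    simp only [List.foldl_cons, ih, pvStep_get?]
    by_cases hk : k = k' <;> by_cases hm : k ∈ ks <;>
      cases hea : ea.get? k <;> cases hev : event.get? k <;>
      simp [hk, hm, hea, hev]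

theorem collect_get? (ks : List String) (events : List (PySem.Dict String String)) :
    ∀ (ea : PySem.Dict String String) (k : String),
      (events.foldl (fun ea event => ks.foldl (fun ea k => pvStep event ea k) ea) ea).get? k
        = if k ∈ ks then (ea.get? k).or (pvFind events k) else ea.get? k := by
  induction events with
  | nil => intro ea k; simp [pvFind]
  | cons e es ih =>
    intro ea k
    simp only [List.foldl_cons, ih, foldl_step_get?, pvFind_cons]
    by_cases hm : k ∈ ks <;> simp [hm, Option.or_assoc]

theorem check_eq (ea : PySem.Dict String String) (events : List (PySem.Dict String String))
    (n : Int) :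
    ∀ (items : List (String × String)) (mc : Int),
      (∀ p ∈ items, ea.get? p.1 = pvFind events p.1) →
      mc + items.length = n →
      pvACheck ea n items mc = pvBGo events items := by
  intro items
  induction items with
  | nil =>
    intro mc h hn
    simp only [List.length_nil, Nat.cast_zero, add_zero] at hn
    simp [pvACheck, pvBGo, hn]
  | cons p rest ih =>
    obtain ⟨k, v⟩ := p
    intro mc h hn
    have hk : ea.get? k = pvFind events k := h (k, v) (by simp)
    rcases hf : pvFind events k with _ | s
    · simp [pvACheck, pvBGo, hk, hf]
    · simp only [pvACheck, pvBGo, hk, hf]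
      by_cases hs : s = v
      · subst hs
        rw [if_pos rfl, if_pos rfl]
        exact ih (mc + 1) (fun q hq => h q (by simp [hq]))
          (by simp only [List.length_cons] at hn ⊢; push_cast at hn ⊢; omega)
      · simp [hs]

-- ===== VERDICT (by name: the statement is the Claim_ definition above) =====
theorem check_trace_event_attributes_spec : Claim_equal_check_trace_event_attributes := by
  intro trace avd _
  simp only [Spec_check_trace_event_attributes, check_trace_event_attributes,
    check_trace_event_attributes_alt]
  apply check_eq
  · intro p hp
    have hkmem : p.1 ∈ (PySem.Dict.ofList avd).keys := PySem.Dict.mem_keys_of_mem_items _ hp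
    rw [collect_get?]
    simp [hkmem]
  · simp [PySem.Dict.size]
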